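-- pv_equiv track=rewrite | github.com/ciprian-robert-szanto/optimal-parameter-search-for-similarity-algorithms-in-string-classification | src/utils/read_file.py | get_strings_from_features
-- ===== SOURCE A (Python) =====
-- def get_strings_from_features(data: list[str], features: list[str], mcf: int = 1):
--     result_array = list()
--     features_set = set(list(map(lambda x : x.lower(), features)))
--
--     for k in data:
--         k_set = set(k.lower().split())
--         if len(k_set.intersection(features_set)) >= mcf:
--             result_array.append(k)
--
--     return result_array
-- ===== SOURCE B (Python) =====
-- def get_strings_from_features(data: list[str], features: list[str], mcf: int = 1):
--     # inverted index: lowercased word -> indices of the strings whose word set contains it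
--     index = {}
--     for i, k in enumerate(data):
--         for w in set(k.lower().split()):
--             index.setdefault(w, []).append(i)
--     counts = {}
--     for fl in set(f.lower() for f in features):
--         for i in index.get(fl, []):
--             counts[i] = counts.get(i, 0) + 1
--     return [k for i, k in enumerate(data) if counts.get(i, 0) >= mcf]
-- ===== Notes on version B (the rewrite author's own statement) =====
-- stated objective: alternative
-- what changed: Replaces the per-string set-intersection test with an inverted index: one pass builds a map from each lowercased word to the indices of the strings containing it, a pass over the distinct lowercased feature words bumps a counter per matching string via the index, and a final pass keeps the strings whose counter reaches mcf.
import Mathlib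
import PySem

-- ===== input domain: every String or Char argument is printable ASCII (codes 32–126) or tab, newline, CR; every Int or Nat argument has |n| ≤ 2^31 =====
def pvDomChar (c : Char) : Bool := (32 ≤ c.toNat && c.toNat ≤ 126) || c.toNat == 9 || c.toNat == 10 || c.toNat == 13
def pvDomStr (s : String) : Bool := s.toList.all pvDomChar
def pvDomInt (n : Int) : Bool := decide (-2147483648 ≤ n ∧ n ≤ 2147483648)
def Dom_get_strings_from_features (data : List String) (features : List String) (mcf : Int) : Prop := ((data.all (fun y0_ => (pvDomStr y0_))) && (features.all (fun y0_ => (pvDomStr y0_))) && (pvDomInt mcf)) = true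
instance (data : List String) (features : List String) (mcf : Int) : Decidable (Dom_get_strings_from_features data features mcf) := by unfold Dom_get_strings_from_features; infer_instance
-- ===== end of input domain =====

-- B replaces per-string set intersections by an inverted index (word -> indices of
-- strings containing it) plus per-string counters bumped once per distinct feature
-- word, and a final filter pass (objective: alternative algorithm, same result).

-- ===== PORT A =====
def get_strings_from_features (data : List String) (features : List String) (mcf : Int) : List String :=
  let features_set : PySem.Set String := PySem.Set.ofList (features.map PySem.Str.lower)
  data.foldl (fun result_array k =>
    let k_set : PySem.Set String := PySem.Set.ofList (PySem.Str.split₀ (PySem.Str.lower k))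
    if mcf ≤ PySem.Set.len (PySem.Set.inter k_set features_set) then result_array ++ [k]
    else result_array) []

-- ===== PORT B =====
-- set(k.lower().split()) of Source B
def pvWords (k : String) : PySem.Set String :=
  PySem.Set.ofList (PySem.Str.split₀ (PySem.Str.lower k))

def get_strings_from_features_alt (data : List String) (features : List String) (mcf : Int) : List String :=
  -- index = {}; for i, k in enumerate(data): for w in set(k.lower().split()): index.setdefault(w, []).append(i)
  let index : PySem.Dict String (List Int) :=
    (PySem.List.enumerate data).foldl (fun d ik =>
      (pvWords ik.2).foldl (fun d w => d.modify w [] (· ++ [ik.1])) d) PySem.Dict.empty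
  -- counts = {}; for fl in set(f.lower() for f in features): for i in index.get(fl, []): counts[i] = counts.get(i, 0) + 1
  -- (the counter bumps commute, so iterating the feature set in first-insertion order is exact)
  let counts : PySem.Dict Int Int :=
    (PySem.Set.ofList (features.map PySem.Str.lower)).foldl (fun d fl =>
      (index.getD fl []).foldl (fun d i => d.modify i 0 (· + 1)) d) PySem.Dict.empty
  -- [k for i, k in enumerate(data) if counts.get(i, 0) >= mcf]
  ((PySem.List.enumerate data).filter (fun ik => mcf ≤ counts.getD ik.1 0)).map (·.2)

-- ===== PRECONDITION & SPEC =====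
def Spec_get_strings_from_features (data : List String) (features : List String) (mcf : Int) (out : List String) : Prop := out = get_strings_from_features_alt data features mcf
instance (data : List String) (features : List String) (mcf : Int) (out : List String) : Decidable (Spec_get_strings_from_features data features mcf out) := by unfold Spec_get_strings_from_features; infer_instance

-- ===== CLAIM (what is proved, stated in full; the proofs are below) =====
def Claim_equal_get_strings_from_features : Prop := ∀ (data : List String) (features : List String) (mcf : Int), Dom_get_strings_from_features data features mcf → Spec_get_strings_from_features data features mcf (get_strings_from_features data features mcf)

-- ===== LEMMAS AND PROOFS =====

-- a nested fold is a flat fold over the flattened list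
theorem pvFoldlFoldl {α β δ : Type} (step : δ → β → δ) (g : α → List β) :
    ∀ (L : List α) (d : δ),
    L.foldl (fun d a => (g a).foldl step d) d = (L.flatMap g).foldl step d := by
  intro L
  induction L with
  | nil => intro d; rfl
  | cons a L ih => intro d; simp [List.foldl_append, ih]

-- the index-building nested loop, flattened to one loop over (word, index) pairs
theorem pvIndexFlatten {delta : Type} (step : delta → (String × Int) → delta) :
    ∀ (L : List (Int × String)) (d : delta),
    L.foldl (fun d ik => (pvWords ik.2).foldl (fun d w => step d (w, ik.1)) d) d
      = (L.flatMap (fun ik => (pvWords ik.2).map (fun w => (w, ik.1)))).foldl step d := by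
  intro L
  induction L with
  | nil => intro d; rfl
  | cons ik L ih =>
    intro d
    simp only [List.foldl_cons, List.flatMap_cons, List.foldl_append, ih, List.foldl_map]

theorem pvContains_eq_decide (t : List String) (x : String) :
    PySem.Set.contains t x = decide (x ∈ t) := by
  by_cases h : x ∈ t <;> simp [h]

-- filtering a duplicate-free list for one element
theorem pvFilter_eq_single {ws : List String} (hnd : ws.Nodup) (fl : String) :
    ws.filter (fun w => w == fl) = if fl ∈ ws then [fl] else [] := by
  induction ws with
  | nil => simp
  | cons w ws ih =>
    have hw : w ∉ ws := (List.nodup_cons.mp hnd).1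
    have ih' := ih (List.nodup_cons.mp hnd).2
    by_cases hwf : w = fl
    · subst hwf
      simp [ih', hw]
    · simp [hwf, ih', Ne.symm hwf]

-- the per-word pair list underlying the index-building loop
def pvPairs (data : List String) : List (String × Int) :=
  (PySem.List.enumerate data).flatMap (fun ik => (pvWords ik.2).map (fun w => (w, ik.1)))

-- each index entry lists, in order, the indices of the strings containing the word
theorem pvPairs_filter_gen (fl : String) :
    ∀ (L : List (Int × String)),
    ((L.flatMap (fun ik => (pvWords ik.2).map (fun w => (w, ik.1)))).filter (fun p => p.1 == fl)).map (·.2)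
      = (L.filter (fun ik => decide (fl ∈ pvWords ik.2))).map (·.1) := by
  intro L
  induction L with
  | nil => rfl
  | cons ik L ih =>
    have hblock : (((pvWords ik.2).map (fun w => (w, ik.1))).filter (fun p => p.1 == fl)).map (·.2)
        = if fl ∈ pvWords ik.2 then [ik.1] else [] := by
      rw [List.filter_map]
      have hc : ((fun p : String × Int => p.1 == fl) ∘ fun w => (w, ik.1)) = fun w => w == fl := rfl
      have hnd : (pvWords ik.2 : List String).Nodup := PySem.Set.nodup_ofList _
      rw [hc, pvFilter_eq_single hnd fl]
      by_cases h : fl ∈ pvWords ik.2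
      · simp [h]
      · simp [h]
    simp only [List.flatMap_cons, List.filter_append, List.map_append, List.filter_cons, ih, hblock]
    by_cases h : fl ∈ pvWords ik.2
    · simp [h]
    · simp [h]

theorem pvPairs_filter (data : List String) (fl : String) :
    ((pvPairs data).filter (fun p => p.1 == fl)).map (·.2)
      = ((PySem.List.enumerate data).filter (fun ik => decide (fl ∈ pvWords ik.2))).map (·.1) :=
  pvPairs_filter_gen fl (PySem.List.enumerate data)

-- counting one first component in a list with distinct first components
theorem pvCount_fst {L : List (Int × String)} (hnd : (L.map (·.1)).Nodup) (q : Int × String → Bool) :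
    ∀ ik ∈ L, ((L.filter q).map (·.1)).count ik.1 = if q ik then 1 else 0 := by
  induction L with
  | nil => intro ik h; cases h
  | cons jk L ih =>
    intro ik hik
    have hj : jk.1 ∉ L.map (·.1) := (List.nodup_cons.mp hnd).1
    have hnd' := (List.nodup_cons.mp hnd).2
    rcases List.mem_cons.mp hik with hik | hik
    · subst hik
      have hzero : ((L.filter q).map (·.1)).count ik.1 = 0 := by
        rw [List.count_eq_zero]
        intro hmem
        exact hj (by
          obtain ⟨p, hp, hpe⟩ := List.mem_map.mp hmem
          exact List.mem_map.mpr ⟨p, (List.mem_filter.mp hp).1, hpe⟩)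
      by_cases hq : q ik = true
      · simp [hq, hzero]
      · simp [hq, hzero]
    · have hne : jk.1 ≠ ik.1 := by
        intro he
        exact hj (he ▸ List.mem_map.mpr ⟨ik, hik, rfl⟩)
      have := ih hnd' ik hik
      by_cases hq : q jk = true
      · simp [hq, hne, this]
      · simp [hq, this]

-- the index's entries are distinct, so each feature word bumps a counter at most once
theorem pvNodup_fst_enumerate (data : List String) :
    ((PySem.List.enumerate data).map (·.1)).Nodup := by
  have h := PySem.List.pairwise_lt_enumerate data 0
  exact List.Pairwise.imp (fun hlt => ne_of_lt hlt) (List.pairwise_map.mpr h)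

-- counting occurrences across a flattened fold
theorem pvCount_flatMap (g : String → List Int) (j : Int) :
    ∀ (F : List String), ((F.flatMap g).count j)
      = (F.map (fun fl => (g fl).count j)).sum := by
  intro F
  induction F with
  | nil => rfl
  | cons fl F ih => simp [List.count_append, ih]

-- two duplicate-free lists have intersections of equal size in either direction
theorem pvFilter_length_comm {F ws : List String} (hF : F.Nodup) (hws : ws.Nodup) :
    (F.filter (fun x => decide (x ∈ ws))).length = (ws.filter (fun x => decide (x ∈ F))).length := by
  apply List.Perm.length_eq
  rw [List.perm_ext_iff_of_nodup (hF.filter _) (hws.filter _)]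
  intro x
  simp only [List.mem_filter, decide_eq_true_eq]
  exact ⟨fun ⟨h1, h2⟩ => ⟨h2, h1⟩, fun ⟨h1, h2⟩ => ⟨h2, h1⟩⟩

-- filtering enumerate by a predicate on the value alone
theorem pvFilter_enumerate_map (p : String → Bool) (data : List String) :
    ∀ (s : Int), ((PySem.List.enumerate data s).filter (fun ik => p ik.2)).map (·.2)
      = data.filter p := by
  induction data with
  | nil => intro s; rfl
  | cons k data ih =>
    intro s
    rw [PySem.List.enumerate_cons]
    by_cases h : p k = true
    · simp [h, ih]
    · simp [h, ih]

-- ===== VERDICT (by name: the statement is the Claim_ definition above) =====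
theorem get_strings_from_features_spec : Claim_equal_get_strings_from_features := by
  intro data features mcf _
  unfold Spec_get_strings_from_features get_strings_from_features get_strings_from_features_alt
  simp only []
  set F : PySem.Set String := PySem.Set.ofList (features.map PySem.Str.lower) with hF
  set E : List (Int × String) := PySem.List.enumerate data with hE
  -- the index built by the nested loop, flattened
  have hindex : (E.foldl (fun d ik =>
        (pvWords ik.2).foldl (fun d w => d.modify w [] (· ++ [ik.1])) d) PySem.Dict.empty)
      = (pvPairs data).foldl (fun d p => d.modify p.1 [] (· ++ [p.2])) PySem.Dict.empty := by
    rw [hE]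
    exact pvIndexFlatten (fun d p => d.modify p.1 [] (· ++ [p.2])) (PySem.List.enumerate data) PySem.Dict.empty
  rw [hindex]
  set index : PySem.Dict String (List Int) :=
    (pvPairs data).foldl (fun d p => d.modify p.1 [] (· ++ [p.2])) PySem.Dict.empty with hidx
  -- each entry of the index
  have hget : ∀ fl, index.getD fl [] = (E.filter (fun ik => decide (fl ∈ pvWords ik.2))).map (·.1) := by
    intro fl
    rw [hidx, PySem.Dict.getD_foldl_modify_append, PySem.Dict.getD_empty, List.nil_append,
      pvPairs_filter]
  -- the counters, flattened
  have hcounts : (F.foldl (fun d fl => (index.getD fl []).foldl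
        (fun d i => d.modify i 0 (· + 1)) d) (PySem.Dict.empty : PySem.Dict Int Int))
      = (F.flatMap (fun fl => index.getD fl [])).foldl
          (fun d i => d.modify i 0 (· + 1)) (PySem.Dict.empty : PySem.Dict Int Int) := by
    exact pvFoldlFoldl _ _ F PySem.Dict.empty
  rw [hcounts]
  set counts : PySem.Dict Int Int := (F.flatMap (fun fl => index.getD fl [])).foldl
    (fun d i => d.modify i 0 (· + 1)) (PySem.Dict.empty : PySem.Dict Int Int) with hcnt
  -- the counter of a string equals the size of its word set's intersection with the feature set
  have hval : ∀ ik ∈ E, counts.getD ik.1 0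
      = (((pvWords ik.2) : List String).filter (fun x => decide (x ∈ (F : List String)))).length := by
    intro ik hik
    rw [hcnt, PySem.Dict.getD_foldl_modify_add_one, PySem.Dict.getD_empty, pvCount_flatMap]
    have hone : ∀ fl, ((index.getD fl []).count ik.1)
        = if (fl ∈ pvWords ik.2) then 1 else 0 := by
      intro fl
      rw [hget fl]
      have := pvCount_fst (pvNodup_fst_enumerate data) (fun jk => decide (fl ∈ pvWords jk.2)) ik (hE ▸ hik)
      rw [this]
      by_cases h : fl ∈ pvWords ik.2 <;> simp [h]
    have hmap : F.map (fun fl => ((index.getD fl []).count ik.1))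
        = F.map (fun fl => if (fl ∈ pvWords ik.2) then (1 : Nat) else 0) :=
      List.map_congr_left (fun fl _ => hone fl)
    rw [hmap]
    have hsum : ∀ (L : List String), (L.map (fun fl => if (fl ∈ pvWords ik.2) then (1 : Nat) else 0)).sum
        = (L.filter (fun x => decide (x ∈ (pvWords ik.2 : List String)))).length := by
      intro L
      induction L with
      | nil => rfl
      | cons x L ih =>
        by_cases h : x ∈ pvWords ik.2
        · simp [h, ih, Nat.add_comm]
        · simp [h, ih]
    rw [hsum]
    have := pvFilter_length_comm (PySem.Set.nodup_ofList (features.map PySem.Str.lower))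
      (PySem.Set.nodup_ofList (PySem.Str.split₀ (PySem.Str.lower ik.2)))
    simp only [pvWords, hF]
    rw [zero_add]
    exact congrArg Nat.cast this
  -- A's per-string test equals B's counter test
  have hAfilter : data.foldl (fun result_array k =>
      if mcf ≤ PySem.Set.len (PySem.Set.inter (PySem.Set.ofList (PySem.Str.split₀ (PySem.Str.lower k))) F)
      then result_array ++ [k] else result_array) []
      = data.filter (fun k => decide (mcf ≤ PySem.Set.len (PySem.Set.inter (pvWords k) F))) := by
    rw [PySem.List.foldl_append_ite_eq_filter
      (fun k => mcf ≤ PySem.Set.len (PySem.Set.inter (PySem.Set.ofList (PySem.Str.split₀ (PySem.Str.lower k))) F)) data []]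
    rfl
  rw [hAfilter]
  have hcond : E.filter (fun ik => decide (mcf ≤ counts.getD ik.1 0))
      = E.filter (fun ik => decide (mcf ≤ PySem.Set.len (PySem.Set.inter (pvWords ik.2) F))) := by
    apply List.filter_congr
    intro ik hik
    rw [hval ik hik]
    have : PySem.Set.len (PySem.Set.inter (pvWords ik.2) F)
        = ((((pvWords ik.2) : List String).filter (fun x => decide (x ∈ (F : List String)))).length : Int) := by
      simp only [PySem.Set.len, PySem.Set.inter, pvContains_eq_decide]
    rw [this]
  rw [hcond, hE, pvFilter_enumerate_map (fun k => decide (mcf ≤ PySem.Set.len (PySem.Set.inter (pvWords k) F))) data 0]
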